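-- pv_equiv track=rewrite | github.com/Vignesh010101/Leetcode-Solutions-With-Python-Part-2 | 3217-number-of-possible-sets-of-closing-branches/number-of-possible-sets-of-closing-branches.py | numberOfSets
-- ===== SOURCE A (Python) =====
-- from typing import List
--
-- def numberOfSets(n: int, maxDistance: int, roads: List[List[int]]) -> int:
--
--     inf = 10**9+7
--     dist = [[inf]*n for _ in range(n)]
--
--     for u,v,w in roads:
--         dist[u][v] = min(dist[u][v],w)
--         dist[v][u] = min(dist[v][u],w)
--
--     def check(D,rem):
--         for k in range(n):
--             for i in range(n):
--                 for j in range(n):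
--                     if D[i][k] < inf and D[k][j] <inf:
--                         D[i][j] = min(D[i][j],D[i][k]+D[k][j])
--
--         for x in rem:
--             for y in rem:
--                 if x == y:continue
--                 if D[x][y]>maxDistance: return False
--
--         return True
--
--     ans = 0
--     for mask in range(1<<n):
--         newDist = [dist[i].copy() for i in range(n)]
--
--         rem = []
--         for i in range(n):
--             if (mask>>i)&1 == 0:
--                 for j in range(n):
--                     newDist[i][j] = inf
--                     newDist[j][i] = inf
--             else:
--                 rem.append(i)
--
--         if check(newDist,rem):
--             ans+=1
--
--
--     return ans
-- ===== SOURCE B (Python) =====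
-- from typing import List
--
-- def numberOfSets(n: int, maxDistance: int, roads: List[List[int]]) -> int:
--     INF = 10**9 + 7
--     adj = [[INF] * n for _ in range(n)]
--     for u, v, w in roads:
--         adj[u][v] = min(adj[u][v], w)
--         adj[v][u] = min(adj[v][u], w)
--
--     ans = 0
--     for mask in range(1 << n):
--         kept = [i for i in range(n) if (mask >> i) & 1]
--         ok = True
--         for s in kept:
--             # single-source shortest paths from s by repeated relaxation
--             # (Bellman-Ford) restricted to the kept nodes
--             dist = {v: (0 if v == s else INF) for v in kept}
--             for _ in kept:
--                 dist = {v: min([dist[v]] + [dist[u] + adj[u][v]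
--                                             for u in kept
--                                             if dist[u] < INF and adj[u][v] < INF])
--                         for v in kept}
--             if any(v != s and dist[v] > maxDistance for v in kept):
--                 ok = False
--                 break
--         if ok:
--             ans += 1
--     return ans
-- ===== Notes on version B (the rewrite author's own statement) =====
-- stated objective: alternative
-- what changed: Per mask, instead of copying the full n x n matrix, blanking removed rows/columns with inf and running an in-place all-pairs Floyd-Warshall triple loop, B runs a per-source single-source shortest-path computation (Bellman-Ford repeated relaxation over a dict keyed by the kept nodes) from each kept node, with an early break on the first bad source.
-- outside the precondition, e.g. on numberOfSets(2, -2, [[0, 0, -1], [0, 1, 1]]): A returns 4, B returns 3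
import Mathlib
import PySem

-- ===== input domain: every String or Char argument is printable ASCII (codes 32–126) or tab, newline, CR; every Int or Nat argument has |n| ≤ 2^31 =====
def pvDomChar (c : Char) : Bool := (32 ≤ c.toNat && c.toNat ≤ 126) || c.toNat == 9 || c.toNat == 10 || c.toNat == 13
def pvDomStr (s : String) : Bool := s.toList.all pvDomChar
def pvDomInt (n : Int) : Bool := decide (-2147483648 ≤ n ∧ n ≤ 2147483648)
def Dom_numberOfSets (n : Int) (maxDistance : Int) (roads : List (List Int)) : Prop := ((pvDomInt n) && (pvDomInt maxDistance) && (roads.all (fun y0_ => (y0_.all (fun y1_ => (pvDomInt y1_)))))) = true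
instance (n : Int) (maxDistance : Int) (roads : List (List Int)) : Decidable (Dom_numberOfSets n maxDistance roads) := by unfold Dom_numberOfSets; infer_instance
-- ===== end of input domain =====

-- B replaces A's per-mask in-place all-pairs Floyd–Warshall over the inf-masked n×n matrix
-- by a per-source single-source repeated-relaxation (Bellman–Ford) over a dict on the kept
-- nodes, with an early break on the first bad source (same return value on Pre_).

-- ===== PORT A =====

-- inf = 10**9+7
def pvInf : Int := 10 ^ 9 + 7

-- Python list-index semantics for an in-range, possibly negative, index
def pvIdx (N : Nat) (i : Int) : Nat := (if i < 0 then i + N else i).toNat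

-- D[i][j] read (the default is only hit out of range, which Pre_ excludes)
def pvGet (D : List (List Int)) (i j : Nat) : Int := (D.getD i []).getD j pvInf

-- D[i][j] = v
def pvSet (D : List (List Int)) (i j : Nat) (v : Int) : List (List Int) :=
  D.set i ((D.getD i []).set j v)

-- dist[u][v] = min(dist[u][v], w); dist[v][u] = min(dist[v][u], w)
def pvEdgeStep (N : Nat) (D : List (List Int)) (r : List Int) : List (List Int) :=
  match r with
  | [u, v, w] =>
    pvSet (pvSet D (pvIdx N u) (pvIdx N v) (min (pvGet D (pvIdx N u) (pvIdx N v)) w))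
      (pvIdx N v) (pvIdx N u)
      (min (pvGet (pvSet D (pvIdx N u) (pvIdx N v) (min (pvGet D (pvIdx N u) (pvIdx N v)) w))
        (pvIdx N v) (pvIdx N u)) w)
  | _ => D

-- dist = [[inf]*n for _ in range(n)]; for u,v,w in roads: ...
def pvEdges (N : Nat) (roads : List (List Int)) : List (List Int) :=
  roads.foldl (pvEdgeStep N) (List.replicate N (List.replicate N pvInf))

-- if D[i][k] < inf and D[k][j] < inf: D[i][j] = min(D[i][j], D[i][k] + D[k][j])
def pvRelaxA (k i : Nat) (D : List (List Int)) (j : Nat) : List (List Int) :=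
  if pvGet D i k < pvInf ∧ pvGet D k j < pvInf then
    pvSet D i j (min (pvGet D i j) (pvGet D i k + pvGet D k j))
  else D

def pvRowA (N k : Nat) (D : List (List Int)) (i : Nat) : List (List Int) :=
  (List.range N).foldl (pvRelaxA k i) D

def pvStepA (N : Nat) (D : List (List Int)) (k : Nat) : List (List Int) :=
  (List.range N).foldl (pvRowA N k) D

-- the Floyd–Warshall triple loop of check
def pvFWA (N : Nat) (D : List (List Int)) : List (List Int) :=
  (List.range N).foldl (pvStepA N) D

-- for j in range(n): newDist[i][j] = inf; newDist[j][i] = inf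
def pvBlankRowStep (i : Nat) (D : List (List Int)) (j : Nat) : List (List Int) :=
  pvSet (pvSet D i j pvInf) j i pvInf

-- per index i: blank row/column i when the bit is 0, else rem.append(i)
def pvBlankStep (N mask : Nat) (s : List (List Int) × List Nat) (i : Nat) :
    List (List Int) × List Nat :=
  if (mask >>> i) &&& 1 == 0 then
    ((List.range N).foldl (pvBlankRowStep i) s.1, s.2)
  else (s.1, s.2 ++ [i])

-- newDist = [dist[i].copy() ...] then the blanking loop, collecting rem
def pvBlank (N mask : Nat) (dist : List (List Int)) : List (List Int) × List Nat :=
  (List.range N).foldl (pvBlankStep N mask) (dist, [])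

-- the pair loop of check (an early `return False` has the same value as `all`)
def pvCheckA (md : Int) (D : List (List Int)) (rem : List Nat) : Bool :=
  rem.all (fun x => rem.all (fun y => x == y || !decide (pvGet D x y > md)))

-- body of the mask loop
def pvMaskA (N : Nat) (md : Int) (dist : List (List Int)) (ans : Int) (mask : Nat) : Int :=
  if pvCheckA md (pvFWA N (pvBlank N mask dist).1) (pvBlank N mask dist).2 then ans + 1 else ans

def numberOfSets (n : Int) (maxDistance : Int) (roads : List (List Int)) : Int :=
  (List.range (2 ^ n.toNat)).foldl (pvMaskA n.toNat maxDistance (pvEdges n.toNat roads)) 0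

-- ===== PORT B =====

-- dist[u] for the dict dist (first match; keys are the distinct kept nodes, u always
-- present on admitted inputs, so the default is never hit)
def pvLook (d : List (Nat × Int)) (u : Nat) : Int :=
  ((d.find? (fun p => p.1 == u)).map Prod.snd).getD pvInf

-- kept = [i for i in range(n) if (mask >> i) & 1]
def pvKept (N mask : Nat) : List Nat :=
  (List.range N).filter (fun i => (mask >>> i) &&& 1 == 1)

-- [dist[u] + adj[u][v] for u in kept if dist[u] < INF and adj[u][v] < INF]
def pvCands (base : List (List Int)) (kept : List Nat) (d : List (Nat × Int)) (v : Nat) :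
    List Int :=
  kept.filterMap (fun u =>
    if pvLook d u < pvInf ∧ pvGet base u v < pvInf then some (pvLook d u + pvGet base u v)
    else none)

-- dist = {v: min([dist[v]] + [...]) for v in kept}
def pvRound (base : List (List Int)) (kept : List Nat) (d : List (Nat × Int)) :
    List (Nat × Int) :=
  kept.map (fun v => (v, (pvCands base kept d v).foldl min (pvLook d v)))

-- dist = {v: (0 if v == s else INF) for v in kept}
def pvDist0 (kept : List Nat) (s : Nat) : List (Nat × Int) :=
  kept.map (fun v => (v, if v = s then 0 else pvInf))

-- for _ in kept: dist = {...}
def pvBF (base : List (List Int)) (kept : List Nat) (s : Nat) : List (Nat × Int) :=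
  kept.foldl (fun d _ => pvRound base kept d) (pvDist0 kept s)

-- any(v != s and dist[v] > maxDistance for v in kept)
def pvSrcBad (md : Int) (base : List (List Int)) (kept : List Nat) (s : Nat) : Bool :=
  kept.any (fun v => !(v == s) && decide (pvLook (pvBF base kept s) v > md))

-- body of the mask loop: ok stays True iff no kept source breaks out
def pvMaskB (N : Nat) (md : Int) (base : List (List Int)) (ans : Int) (mask : Nat) : Int :=
  if (pvKept N mask).all (fun s => !pvSrcBad md base (pvKept N mask) s) then ans + 1 else ans

def numberOfSets_alt (n : Int) (maxDistance : Int) (roads : List (List Int)) : Int :=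
  (List.range (2 ^ n.toNat)).foldl (pvMaskB n.toNat maxDistance (pvEdges n.toNat roads)) 0

-- ===== PRECONDITION & SPEC =====
-- Pre_ excludes the inputs where Python A raises (n < 0 makes `1 << n` raise ValueError,
-- a road row that is not a triple fails tuple unpacking, an endpoint outside Python's
-- in-range window [-n, n-1] is an IndexError) and, beyond those, roads with a negative
-- weight, on which the pairwise "distance" is ill-defined (negative self-loops/cycles)
-- and A's in-place Floyd–Warshall values are artifacts of relaxation order (the problem
-- guarantees positive weights).
def Pre_numberOfSets (n : Int) (maxDistance : Int) (roads : List (List Int)) : Prop :=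
  0 ≤ n ∧ ∀ r ∈ roads, r.length = 3 ∧
    -n ≤ r.getD 0 0 ∧ r.getD 0 0 < n ∧ -n ≤ r.getD 1 0 ∧ r.getD 1 0 < n ∧ 0 ≤ r.getD 2 0

instance (n : Int) (maxDistance : Int) (roads : List (List Int)) : Decidable (Pre_numberOfSets n maxDistance roads) := by unfold Pre_numberOfSets; infer_instance

def pvWitness_numberOfSets : Int × Int × List (List Int) := (3, 4, [[0, 1, 2], [1, 2, 3], [-1, 0, 10]])

def Spec_numberOfSets (n : Int) (maxDistance : Int) (roads : List (List Int)) (out : Int) : Prop := out = numberOfSets_alt n maxDistance roads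
instance (n : Int) (maxDistance : Int) (roads : List (List Int)) (out : Int) : Decidable (Spec_numberOfSets n maxDistance roads out) := by unfold Spec_numberOfSets; infer_instance

-- ===== CLAIM (what is proved, stated in full; the proofs are below) =====
def Claim_equal_numberOfSets : Prop := ∀ (n : Int) (maxDistance : Int) (roads : List (List Int)), Dom_numberOfSets n maxDistance roads → Pre_numberOfSets n maxDistance roads → Spec_numberOfSets n maxDistance roads (numberOfSets n maxDistance roads)

-- ===== LEMMAS AND PROOFS =====

-- shape of an N×N matrix
def pvShp (N : Nat) (D : List (List Int)) : Prop :=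
  D.length = N ∧ ∀ row ∈ D, row.length = N

-- bit i of mask ("branch i is kept")
def pvKp (mask i : Nat) : Bool := (mask >>> i) &&& 1 == 1

-- the kept nodes, in increasing order
def pvRem (N mask : Nat) : List Nat := (List.range N).filter (pvKp mask)

theorem pvKp_bit (mask i : Nat) : ((mask >>> i) &&& 1 == 0) = !pvKp mask i := by
  unfold pvKp
  rcases Nat.mod_two_eq_zero_or_one (mask >>> i) with h | h <;>
    simp [Nat.and_one_is_mod, h]

-- ---- generic fold lemmas ----

theorem pvFoldlExt {α ι : Type} (f g : α → ι → α) :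
    ∀ (l : List ι), (∀ s x, x ∈ l → f s x = g s x) → ∀ s, l.foldl f s = l.foldl g s := by
  intro l
  induction l with
  | nil => intro _ s; rfl
  | cons x t ih =>
    intro h s
    simp only [List.foldl_cons]
    rw [h s x (by simp)]
    exact ih (fun s y hy => h s y (List.mem_cons_of_mem _ hy)) _

theorem pvFoldlInv {α ι : Type} (P : α → Prop) (f : α → ι → α) :
    ∀ (l : List ι), (∀ s x, x ∈ l → P s → P (f s x)) → ∀ s, P s → P (l.foldl f s) := by
  intro l
  induction l with
  | nil => intro _ s hs; exact hs
  | cons x t ih =>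
    intro h s hs
    simp only [List.foldl_cons]
    exact ih (fun s y hy => h s y (List.mem_cons_of_mem _ hy)) _ (h s x (by simp) hs)

-- ---- fold-min lemmas ----

theorem pvFoldMin_le_init : ∀ (l : List Int) (i : Int), l.foldl min i ≤ i := by
  intro l
  induction l with
  | nil => intro i; exact le_refl i
  | cons x t ih =>
    intro i
    simp only [List.foldl_cons]
    exact le_trans (ih (min i x)) (min_le_left i x)

theorem pvFoldMin_le_mem : ∀ (l : List Int) (i x : Int), x ∈ l → l.foldl min i ≤ x := by
  intro l
  induction l with
  | nil => intro i x hx; cases hx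
  | cons a t ih =>
    intro i x hx
    simp only [List.foldl_cons]
    rcases List.mem_cons.mp hx with rfl | hx
    · exact le_trans (pvFoldMin_le_init t (min i x)) (min_le_right i x)
    · exact ih (min i a) x hx

theorem pvFoldMin_cases : ∀ (l : List Int) (i : Int), l.foldl min i = i ∨ l.foldl min i ∈ l := by
  intro l
  induction l with
  | nil => intro i; exact Or.inl rfl
  | cons a t ih =>
    intro i
    simp only [List.foldl_cons]
    rcases ih (min i a) with h | h
    · rw [h]
      rcases min_cases i a with ⟨h1, _⟩ | ⟨h1, _⟩
      · exact Or.inl h1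
      · exact Or.inr (by rw [h1]; exact List.mem_cons_self)
    · exact Or.inr (List.mem_cons_of_mem _ h)

-- ---- basic matrix lemmas ----

theorem pvGetD_eq_getElem {α : Type} (l : List α) (d : α) {a : Nat} (ha : a < l.length) :
    l.getD a d = l[a] := by
  rw [List.getD_eq_getElem?_getD, List.getElem?_eq_getElem ha]; rfl

theorem pvGetD_set_of_lt {α : Type} (l : List α) (i n : Nat) (v d : α) (hi : i < l.length) :
    (l.set i v).getD n d = if i = n then v else l.getD n d := by
  rw [List.getD_eq_getElem?_getD, List.getElem?_set]
  split_ifs with h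
  · simp
  · rw [List.getD_eq_getElem?_getD]

theorem pvShp_set {N : Nat} {D : List (List Int)} (h : pvShp N D) (i j : Nat) (v : Int) :
    pvShp N (pvSet D i j v) := by
  by_cases hi : i < D.length
  · refine ⟨by simp [pvSet, h.1], ?_⟩
    intro row hrow
    rcases List.mem_or_eq_of_mem_set hrow with hm | he
    · exact h.2 row hm
    · subst he
      rw [List.length_set, pvGetD_eq_getElem D [] hi]
      exact h.2 _ (List.getElem_mem hi)
  · unfold pvSet
    rw [List.set_eq_of_length_le (by omega)]
    exact h

-- entries out of range read as pvInf
theorem pvGet_big {N : Nat} {D : List (List Int)} (hD : pvShp N D) (a b : Nat)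
    (h : ¬(a < N ∧ b < N)) : pvGet D a b = pvInf := by
  by_cases ha : a < N
  · have hb : ¬ b < N := fun hb => h ⟨ha, hb⟩
    have haD : a < D.length := hD.1 ▸ ha
    unfold pvGet
    rw [pvGetD_eq_getElem D [] haD]
    have : D[a].length = N := hD.2 _ (List.getElem_mem haD)
    rw [List.getD_eq_getElem?_getD, List.getElem?_eq_none (by omega)]
    rfl
  · unfold pvGet
    have hrow : D.getD a [] = [] := by
      rw [List.getD_eq_getElem?_getD, List.getElem?_eq_none (by rw [hD.1]; omega)]
      rfl
    rw [hrow]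
    rfl

theorem pvGet_set' {N : Nat} {D : List (List Int)} (hD : pvShp N D) {i j : Nat}
    (hi : i < N) (hj : j < N) (v : Int) (a b : Nat) :
    pvGet (pvSet D i j v) a b = if a = i ∧ b = j then v else pvGet D a b := by
  by_cases ha : a < N
  · by_cases hb : b < N
    · have hiD : i < D.length := hD.1 ▸ hi
      have hrowlen : (D.getD i []).length = N := by
        rw [pvGetD_eq_getElem D [] hiD]
        exact hD.2 _ (List.getElem_mem hiD)
      unfold pvGet pvSet
      rw [pvGetD_set_of_lt D i a _ [] hiD]
      by_cases hai : i = a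
      · rw [if_pos hai]
        subst hai
        rw [pvGetD_set_of_lt _ j b v pvInf (by rw [hrowlen]; exact hj)]
        split_ifs with h1 h2 h2 <;> first | rfl | omega
      · rw [if_neg hai, if_neg (fun hc => hai hc.1.symm)]
    · rw [pvGet_big (pvShp_set hD i j v) a b (by omega),
        pvGet_big hD a b (by omega), if_neg (by omega)]
  · rw [pvGet_big (pvShp_set hD i j v) a b (by omega),
      pvGet_big hD a b (by omega), if_neg (by intro hc; omega)]

-- ---- blanking ----

theorem pvBlankRow (N i : Nat) (hi : i < N) :
    ∀ (m : Nat), m ≤ N → ∀ D, pvShp N D →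
      pvShp N ((List.range m).foldl (pvBlankRowStep i) D) ∧
      ∀ a b, a < N → b < N →
        pvGet ((List.range m).foldl (pvBlankRowStep i) D) a b =
          if (a = i ∧ b < m) ∨ (b = i ∧ a < m) then pvInf else pvGet D a b := by
  intro m
  induction m with
  | zero =>
    intro _ D hD
    refine ⟨hD, ?_⟩
    intro a b _ _
    simp
  | succ m ih =>
    intro hm D hD
    obtain ⟨ihS, ihG⟩ := ih (by omega) D hD
    rw [List.range_succ, List.foldl_append, List.foldl_cons, List.foldl_nil]
    have hmN : m < N := by omega
    have hS1 : pvShp N (pvSet ((List.range m).foldl (pvBlankRowStep i) D) i m pvInf) :=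
      pvShp_set ihS i m pvInf
    constructor
    · exact pvShp_set hS1 m i pvInf
    · intro a b haN hbN
      show pvGet (pvSet (pvSet ((List.range m).foldl (pvBlankRowStep i) D) i m pvInf) m i pvInf) a b = _
      rw [pvGet_set' hS1 hmN hi pvInf a b, pvGet_set' ihS hi hmN pvInf a b, ihG a b haN hbN]
      split_ifs <;> first | rfl | omega

theorem pvBlank_spec (N mask : Nat) (dist : List (List Int)) (hd : pvShp N dist) :
    pvShp N (pvBlank N mask dist).1 ∧
    (pvBlank N mask dist).2 = pvRem N mask ∧
    ∀ a b, a < N → b < N →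
      pvGet (pvBlank N mask dist).1 a b =
        if pvKp mask a ∧ pvKp mask b then pvGet dist a b else pvInf := by
  have main : ∀ m, m ≤ N →
      pvShp N (((List.range m).foldl (pvBlankStep N mask) (dist, [])).1) ∧
      ((List.range m).foldl (pvBlankStep N mask) (dist, [])).2 =
        (List.range m).filter (pvKp mask) ∧
      ∀ a b, a < N → b < N →
        pvGet (((List.range m).foldl (pvBlankStep N mask) (dist, [])).1) a b =
          if (pvKp mask a = false ∧ a < m) ∨ (pvKp mask b = false ∧ b < m) then pvInf
          else pvGet dist a b := by
    intro m
    induction m with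
    | zero =>
      intro _
      refine ⟨hd, rfl, ?_⟩
      intro a b _ _
      simp
    | succ m ih =>
      intro hm
      obtain ⟨ihS, ihR, ihG⟩ := ih (by omega)
      have hmN : m < N := by omega
      rw [List.range_succ, List.foldl_append, List.foldl_cons, List.foldl_nil]
      cases hk : pvKp mask m with
      | false =>
        have hstep : pvBlankStep N mask ((List.range m).foldl (pvBlankStep N mask) (dist, [])) m =
            ((List.range N).foldl (pvBlankRowStep m)
              (((List.range m).foldl (pvBlankStep N mask) (dist, []))).1,
             (((List.range m).foldl (pvBlankStep N mask) (dist, []))).2) := by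
          unfold pvBlankStep
          rw [pvKp_bit, hk]
          simp
        rw [hstep]
        obtain ⟨bS, bG⟩ := pvBlankRow N m hmN N (le_refl N) _ ihS
        refine ⟨bS, ?_, ?_⟩
        · show ((List.range m).foldl (pvBlankStep N mask) (dist, [])).2 = _
          rw [List.filter_append, ihR]
          simp [hk]
        · intro a b haN hbN
          show pvGet ((List.range N).foldl (pvBlankRowStep m)
            (((List.range m).foldl (pvBlankStep N mask) (dist, []))).1) a b = _
          rw [bG a b haN hbN, ihG a b haN hbN]
          by_cases ham : a = m
          · subst ham
            simp [hk, hbN]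
          · by_cases hbm : b = m
            · subst hbm
              simp [hk, haN, ham]
            · rw [if_neg (by simp [ham, hbm])]
              have hiff : ((pvKp mask a = false ∧ a < m) ∨ (pvKp mask b = false ∧ b < m)) ↔
                  ((pvKp mask a = false ∧ a < m + 1) ∨ (pvKp mask b = false ∧ b < m + 1)) := by
                constructor
                · rintro (⟨h1, h2⟩ | ⟨h1, h2⟩)
                  · exact Or.inl ⟨h1, by omega⟩
                  · exact Or.inr ⟨h1, by omega⟩
                · rintro (⟨h1, h2⟩ | ⟨h1, h2⟩)
                  · exact Or.inl ⟨h1, by omega⟩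
                  · exact Or.inr ⟨h1, by omega⟩
              exact if_congr hiff rfl rfl
      | true =>
        have hstep : pvBlankStep N mask ((List.range m).foldl (pvBlankStep N mask) (dist, [])) m =
            ((((List.range m).foldl (pvBlankStep N mask) (dist, []))).1,
             (((List.range m).foldl (pvBlankStep N mask) (dist, []))).2 ++ [m]) := by
          unfold pvBlankStep
          rw [pvKp_bit, hk]
          simp
        rw [hstep]
        refine ⟨ihS, ?_, ?_⟩
        · show ((List.range m).foldl (pvBlankStep N mask) (dist, [])).2 ++ [m] = _
          rw [List.filter_append, ihR]
          simp [hk]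
        · intro a b haN hbN
          show pvGet (((List.range m).foldl (pvBlankStep N mask) (dist, []))).1 a b = _
          rw [ihG a b haN hbN]
          have ha_ne : pvKp mask a = false → a ≠ m := by
            intro h1 he
            rw [he, hk] at h1
            cases h1
          have hb_ne : pvKp mask b = false → b ≠ m := by
            intro h1 he
            rw [he, hk] at h1
            cases h1
          have hiff : ((pvKp mask a = false ∧ a < m) ∨ (pvKp mask b = false ∧ b < m)) ↔
              ((pvKp mask a = false ∧ a < m + 1) ∨ (pvKp mask b = false ∧ b < m + 1)) := by
            constructor
            · rintro (⟨h1, h2⟩ | ⟨h1, h2⟩)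
              · exact Or.inl ⟨h1, by omega⟩
              · exact Or.inr ⟨h1, by omega⟩
            · rintro (⟨h1, h2⟩ | ⟨h1, h2⟩)
              · exact Or.inl ⟨h1, by have := ha_ne h1; omega⟩
              · exact Or.inr ⟨h1, by have := hb_ne h1; omega⟩
          exact if_congr hiff rfl rfl
  obtain ⟨h1, h2, h3⟩ := main N (le_refl N)
  refine ⟨h1, h2, ?_⟩
  intro a b haN hbN
  show pvGet (((List.range N).foldl (pvBlankStep N mask) (dist, []))).1 a b = _
  rw [h3 a b haN hbN]
  cases hka : pvKp mask a <;> cases hkb : pvKp mask b <;> simp [haN, hbN]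

-- ---- walks ----

def pvEnd (x : Nat) (s : List Nat) : Nat := s.getLastD x

def pvCost (g : Nat → Nat → Int) : Nat → List Nat → Int
  | _, [] => 0
  | x, y :: t => g x y + pvCost g y t

def pvChain (g : Nat → Nat → Int) : Nat → List Nat → Prop
  | _, [] => True
  | x, y :: t => g x y < pvInf ∧ pvChain g y t

theorem pvEnd_concat (x a : Nat) (s : List Nat) : pvEnd x (s ++ [a]) = a := by
  simp [pvEnd]

theorem pvEnd_cons (x a : Nat) (s : List Nat) : pvEnd x (a :: s) = pvEnd a s := by
  simp only [pvEnd]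
  exact List.getLastD_cons

theorem pvCost_append (g : Nat → Nat → Int) :
    ∀ (s t : List Nat) (x : Nat), pvCost g x (s ++ t) = pvCost g x s + pvCost g (pvEnd x s) t := by
  intro s
  induction s with
  | nil => intro t x; simp [pvCost, pvEnd]
  | cons a s' ih =>
    intro t x
    simp only [List.cons_append, pvCost]
    rw [ih t a]
    rw [pvEnd_cons x a s', add_assoc]

theorem pvChain_append (g : Nat → Nat → Int) :
    ∀ (s t : List Nat) (x : Nat),
      pvChain g x (s ++ t) ↔ pvChain g x s ∧ pvChain g (pvEnd x s) t := by
  intro s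
  induction s with
  | nil => intro t x; simp [pvChain, pvEnd]
  | cons a s' ih =>
    intro t x
    simp only [List.cons_append, pvChain]
    rw [ih t a]
    rw [pvEnd_cons x a s']
    tauto

theorem pvCost_nonneg (g : Nat → Nat → Int) (hg : ∀ u v, 0 ≤ g u v) :
    ∀ (l : List Nat) (x : Nat), 0 ≤ pvCost g x l := by
  intro l
  induction l with
  | nil => intro x; exact le_refl 0
  | cons a t ih =>
    intro x
    have := hg x a
    have := ih a
    simp only [pvCost]
    omega

theorem pvChain_mem (g : Nat → Nat → Int) :
    ∀ (l : List Nat) (x : Nat), pvChain g x l → ∀ v ∈ l, ∃ u, g u v < pvInf := by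
  intro l
  induction l with
  | nil => intro x _ v hv; cases hv
  | cons a t ih =>
    intro x hc v hv
    rcases List.mem_cons.mp hv with rfl | hv
    · exact ⟨x, hc.1⟩
    · exact ih a hc.2 v hv

-- duplicate decomposition of a non-nodup list
theorem pvDupSplit {α : Type} [DecidableEq α] :
    ∀ (l : List α), ¬ l.Nodup → ∃ p v q r, l = p ++ v :: q ++ v :: r := by
  intro l
  induction l with
  | nil => intro h; exact absurd List.nodup_nil h
  | cons a t ih =>
    intro h
    by_cases ha : a ∈ t
    · obtain ⟨q, r, rfl⟩ := List.append_of_mem ha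
      exact ⟨[], a, q, r, rfl⟩
    · have hnt : ¬ t.Nodup := by
        intro hnd
        exact h (List.nodup_cons.mpr ⟨ha, hnd⟩)
      obtain ⟨p, v, q, r, rfl⟩ := ih hnt
      exact ⟨a :: p, v, q, r, rfl⟩

-- cutting an arbitrary walk down to a nodup walk of no larger cost
theorem pvCut (g : Nat → Nat → Int) (hg : ∀ u v, 0 ≤ g u v) :
    ∀ (m : Nat) (l : List Nat) (x y : Nat), l.length ≤ m → x ≠ y →
      pvChain g x (l ++ [y]) →
      ∃ l', pvChain g x (l' ++ [y]) ∧ (x :: l' ++ [y]).Nodup ∧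
        pvCost g x (l' ++ [y]) ≤ pvCost g x (l ++ [y]) := by
  intro m
  induction m with
  | zero =>
    intro l x y hlen hxy hc
    have hl : l = [] := List.eq_nil_of_length_eq_zero (by omega)
    subst hl
    exact ⟨[], hc, by simp [hxy], le_refl _⟩
  | succ m ih =>
    intro l x y hlen hxy hc
    by_cases hx : x ∈ l
    · obtain ⟨p, q, rfl⟩ := List.append_of_mem hx
      have hL : (p ++ x :: q) ++ [y] = (p ++ [x]) ++ (q ++ [y]) := by simp
      rw [hL] at hc
      have hc' := (pvChain_append g (p ++ [x]) (q ++ [y]) x).mp hc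
      rw [pvEnd_concat] at hc'
      have hq : q.length ≤ m := by
        simp only [List.length_append, List.length_cons] at hlen
        omega
      obtain ⟨l', h1, h2, h3⟩ := ih q x y hq hxy hc'.2
      refine ⟨l', h1, h2, ?_⟩
      have hcost := pvCost_append g (p ++ [x]) (q ++ [y]) x
      rw [pvEnd_concat] at hcost
      rw [hL, hcost]
      have := pvCost_nonneg g hg (p ++ [x]) x
      omega
    · by_cases hy : y ∈ l
      · obtain ⟨p, q, rfl⟩ := List.append_of_mem hy
        have hL : (p ++ y :: q) ++ [y] = (p ++ [y]) ++ (q ++ [y]) := by simp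
        rw [hL] at hc
        have hc' := (pvChain_append g (p ++ [y]) (q ++ [y]) x).mp hc
        have hp : p.length ≤ m := by
          simp only [List.length_append, List.length_cons] at hlen
          omega
        obtain ⟨l', h1, h2, h3⟩ := ih p x y hp hxy hc'.1
        refine ⟨l', h1, h2, ?_⟩
        have hcost := pvCost_append g (p ++ [y]) (q ++ [y]) x
        rw [pvEnd_concat] at hcost
        rw [hL, hcost]
        have := pvCost_nonneg g hg (q ++ [y]) y
        omega
      · by_cases hndl : l.Nodup
        · refine ⟨l, hc, ?_, le_refl _⟩
          rw [List.cons_append, List.nodup_cons]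
          constructor
          · intro hmem
            rcases List.mem_append.mp hmem with h | h
            · exact hx h
            · exact hxy (List.mem_singleton.mp h)
          · rw [List.nodup_append]
            refine ⟨hndl, List.nodup_singleton y, ?_⟩
            intro a ha b hb he
            subst he
            exact hy ((List.mem_singleton.mp hb) ▸ ha)
        · obtain ⟨p, v, q, r, rfl⟩ := pvDupSplit l hndl
          have hL : ((p ++ v :: q ++ v :: r) ++ [y]) =
              (p ++ [v]) ++ ((q ++ [v]) ++ (r ++ [y])) := by simp
          rw [hL] at hc
          have hca := (pvChain_append g (p ++ [v]) ((q ++ [v]) ++ (r ++ [y])) x).mp hc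
          rw [pvEnd_concat] at hca
          have hcb := (pvChain_append g (q ++ [v]) (r ++ [y]) v).mp hca.2
          rw [pvEnd_concat] at hcb
          have he : (p ++ v :: r) ++ [y] = (p ++ [v]) ++ (r ++ [y]) := by simp
          have hc' : pvChain g x ((p ++ v :: r) ++ [y]) := by
            rw [he]
            exact (pvChain_append g (p ++ [v]) (r ++ [y]) x).mpr
              ⟨hca.1, by rw [pvEnd_concat]; exact hcb.2⟩
          have hlen' : (p ++ v :: r).length ≤ m := by
            simp only [List.length_append, List.length_cons] at hlen ⊢
            omega
          obtain ⟨l', h1, h2, h3⟩ := ih _ x y hlen' hxy hc'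
          refine ⟨l', h1, h2, le_trans h3 ?_⟩
          have e1 := pvCost_append g (p ++ [v]) (r ++ [y]) x
          rw [pvEnd_concat] at e1
          have e2 := pvCost_append g (p ++ [v]) ((q ++ [v]) ++ (r ++ [y])) x
          rw [pvEnd_concat] at e2
          have e3 := pvCost_append g (q ++ [v]) (r ++ [y]) v
          rw [pvEnd_concat] at e3
          rw [he, e1, hL, e2, e3]
          have := pvCost_nonneg g hg (q ++ [v]) v
          omega

-- ---- A-side invariants ----

def pvBnd (N : Nat) (D : List (List Int)) : Prop :=
  pvShp N D ∧ ∀ a b, 0 ≤ pvGet D a b ∧ pvGet D a b ≤ pvInf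

def pvLB (g : Nat → Nat → Int) (D : List (List Int)) : Prop :=
  ∀ a b, pvGet D a b = pvInf ∨
    ∃ l, pvChain g a (l ++ [b]) ∧ pvGet D a b = pvCost g a (l ++ [b])

def pvLe (D D' : List (List Int)) : Prop := ∀ a b, pvGet D a b ≤ pvGet D' a b

def pvUB (g : Nat → Nat → Int) (c : Nat) (D : List (List Int)) : Prop :=
  ∀ a b l, pvChain g a (l ++ [b]) → (a :: l ++ [b]).Nodup → (∀ v ∈ l, v < c) →
    pvGet D a b ≤ pvCost g a (l ++ [b])

theorem pvRelax_le {N : Nat} {D : List (List Int)} (hD : pvShp N D) {k i j : Nat}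
    (hi : i < N) (hj : j < N) : pvLe (pvRelaxA k i D j) D := by
  intro a b
  unfold pvRelaxA
  split_ifs with h
  · rw [pvGet_set' hD hi hj _ a b]
    split_ifs with hc
    · obtain ⟨rfl, rfl⟩ := hc
      exact min_le_left _ _
    · exact le_refl _
  · exact le_refl _

theorem pvRelax_shp {N : Nat} {D : List (List Int)} (hD : pvShp N D) (k i j : Nat) :
    pvShp N (pvRelaxA k i D j) := by
  unfold pvRelaxA
  split_ifs with h
  · exact pvShp_set hD i j _
  · exact hD

theorem pvRelax_bnd {N : Nat} {D : List (List Int)} (hD : pvBnd N D) {k i j : Nat}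
    (hi : i < N) (hj : j < N) : pvBnd N (pvRelaxA k i D j) := by
  obtain ⟨hshp, hent⟩ := hD
  refine ⟨pvRelax_shp hshp k i j, ?_⟩
  intro a b
  unfold pvRelaxA
  split_ifs with h
  · rw [pvGet_set' hshp hi hj _ a b]
    split_ifs with hc
    · refine ⟨le_min (hent i j).1 (add_nonneg (hent i k).1 (hent k j).1),
        le_trans (min_le_left _ _) (hent i j).2⟩
    · exact hent a b
  · exact hent a b

theorem pvRelax_lb {N : Nat} (g : Nat → Nat → Int) {D : List (List Int)}
    (hD : pvShp N D) (hLB : pvLB g D) {k i j : Nat} (hi : i < N) (hj : j < N) :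
    pvLB g (pvRelaxA k i D j) := by
  intro a b
  unfold pvRelaxA
  split_ifs with h
  · rw [pvGet_set' hD hi hj _ a b]
    split_ifs with hc
    · obtain ⟨rfl, rfl⟩ := hc
      rcases min_cases (pvGet D a b) (pvGet D a k + pvGet D k b) with ⟨hm, _⟩ | ⟨hm, _⟩
      · rw [hm]
        exact hLB a b
      · rcases hLB a k with h1 | ⟨l1, hc1, he1⟩
        · rw [h1] at h
          exact absurd h.1 (lt_irrefl _)
        · rcases hLB k b with h2 | ⟨l2, hc2, he2⟩
          · rw [h2] at h
            exact absurd h.2 (lt_irrefl _)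
          · have hL : (l1 ++ k :: l2) ++ [b] = (l1 ++ [k]) ++ (l2 ++ [b]) := by simp
            refine Or.inr ⟨l1 ++ k :: l2, ?_, ?_⟩
            · rw [hL]
              exact (pvChain_append g (l1 ++ [k]) (l2 ++ [b]) a).mpr
                ⟨hc1, by rw [pvEnd_concat]; exact hc2⟩
            · have hcost := pvCost_append g (l1 ++ [k]) (l2 ++ [b]) a
              rw [pvEnd_concat] at hcost
              rw [hm, hL, hcost, ← he1, ← he2]
    · exact hLB a b
  · exact hLB a b

-- monotone fold: shape is kept and entries only decrease
theorem pvFoldLe {N : Nat} (f : List (List Int) → Nat → List (List Int)) :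
    ∀ (l : List Nat), (∀ D x, x ∈ l → pvShp N D → pvShp N (f D x) ∧ pvLe (f D x) D) →
      ∀ (D : List (List Int)), pvShp N D →
        pvShp N (l.foldl f D) ∧ pvLe (l.foldl f D) D := by
  intro l
  induction l with
  | nil => intro _ D hD; exact ⟨hD, fun a b => le_refl _⟩
  | cons x t ih =>
    intro hf D hD
    obtain ⟨h1, h2⟩ := hf D x (by simp) hD
    obtain ⟨h3, h4⟩ := ih (fun D y hy hD' => hf D y (List.mem_cons_of_mem _ hy) hD') (f D x) h1
    exact ⟨h3, fun a b => le_trans (h4 a b) (h2 a b)⟩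

theorem pvRowA_le {N k i : Nat} (hi : i < N) {D : List (List Int)} (hD : pvShp N D) :
    pvShp N (pvRowA N k D i) ∧ pvLe (pvRowA N k D i) D := by
  refine pvFoldLe (pvRelaxA k i) (List.range N) ?_ D hD
  intro D' x hx hD'
  exact ⟨pvRelax_shp hD' k i x, pvRelax_le hD' hi (List.mem_range.mp hx)⟩

theorem pvStepA_le {N k : Nat} {D : List (List Int)} (hD : pvShp N D) :
    pvShp N (pvStepA N D k) ∧ pvLe (pvStepA N D k) D := by
  refine pvFoldLe (pvRowA N k) (List.range N) ?_ D hD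
  intro D' x hx hD'
  exact pvRowA_le (List.mem_range.mp hx) hD'

theorem pvStepA_pres {N : Nat} (g : Nat → Nat → Int) {D : List (List Int)} (k : Nat)
    (h : pvBnd N D ∧ pvLB g D) : pvBnd N (pvStepA N D k) ∧ pvLB g (pvStepA N D k) := by
  unfold pvStepA
  refine pvFoldlInv (fun D' => pvBnd N D' ∧ pvLB g D') _ (List.range N) ?_ D h
  intro D' x hx hP
  unfold pvRowA
  refine pvFoldlInv (fun D'' => pvBnd N D'' ∧ pvLB g D'') _ (List.range N) ?_ D' hP
  intro D'' y hy hP'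
  exact ⟨pvRelax_bnd hP'.1 (List.mem_range.mp hx) (List.mem_range.mp hy),
    pvRelax_lb g hP'.1.1 hP'.2 (List.mem_range.mp hx) (List.mem_range.mp hy)⟩

-- at the visit of (i0, j0) inside round k, the entry is relaxed through k
theorem pvStep_visit {N k : Nat} {D : List (List Int)} (hD : pvShp N D)
    {i0 j0 : Nat} (hi0 : i0 < N) (hj0 : j0 < N)
    (h1 : pvGet D i0 k < pvInf) (h2 : pvGet D k j0 < pvInf) :
    pvGet (pvStepA N D k) i0 j0 ≤ pvGet D i0 k + pvGet D k j0 := by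
  obtain ⟨la, lb, hsplit⟩ := List.append_of_mem (List.mem_range.mpr hi0)
  have hmemA : ∀ x ∈ la, x < N := by
    intro x hx
    have : x ∈ List.range N := by rw [hsplit]; exact List.mem_append_left _ hx
    exact List.mem_range.mp this
  have hmemB : ∀ x ∈ lb, x < N := by
    intro x hx
    have : x ∈ List.range N := by
      rw [hsplit]
      exact List.mem_append_right _ (List.mem_cons_of_mem _ hx)
    exact List.mem_range.mp this
  unfold pvStepA
  rw [hsplit, List.foldl_append, List.foldl_cons]
  obtain ⟨hshp1, hle1⟩ := pvFoldLe (pvRowA N k) la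
    (fun D' x hx hD' => pvRowA_le (hmemA x hx) hD') D hD
  set D1 := la.foldl (pvRowA N k) D with hD1
  obtain ⟨la2, lb2, hsplit2⟩ := List.append_of_mem (List.mem_range.mpr hj0)
  have hmemA2 : ∀ x ∈ la2, x < N := by
    intro x hx
    have : x ∈ List.range N := by rw [hsplit2]; exact List.mem_append_left _ hx
    exact List.mem_range.mp this
  have hmemB2 : ∀ x ∈ lb2, x < N := by
    intro x hx
    have : x ∈ List.range N := by
      rw [hsplit2]
      exact List.mem_append_right _ (List.mem_cons_of_mem _ hx)
    exact List.mem_range.mp this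
  have hrow : pvRowA N k D1 i0 =
      lb2.foldl (pvRelaxA k i0) (pvRelaxA k i0 (la2.foldl (pvRelaxA k i0) D1) j0) := by
    unfold pvRowA
    rw [hsplit2, List.foldl_append, List.foldl_cons]
  obtain ⟨hshp2, hle2⟩ := pvFoldLe (pvRelaxA k i0) la2
    (fun D' x hx hD' => ⟨pvRelax_shp hD' k i0 x, pvRelax_le hD' hi0 (hmemA2 x hx)⟩) D1 hshp1
  set D2 := la2.foldl (pvRelaxA k i0) D1 with hD2
  have hle2' : ∀ a b, pvGet D2 a b ≤ pvGet D a b :=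
    fun a b => le_trans (hle2 a b) (hle1 a b)
  have hg1 : pvGet D2 i0 k < pvInf := lt_of_le_of_lt (hle2' i0 k) h1
  have hg2 : pvGet D2 k j0 < pvInf := lt_of_le_of_lt (hle2' k j0) h2
  have hX : pvRelaxA k i0 D2 j0 =
      pvSet D2 i0 j0 (min (pvGet D2 i0 j0) (pvGet D2 i0 k + pvGet D2 k j0)) := by
    unfold pvRelaxA
    rw [if_pos ⟨hg1, hg2⟩]
  have hXshp : pvShp N (pvRelaxA k i0 D2 j0) := pvRelax_shp hshp2 k i0 j0
  have hXval : pvGet (pvRelaxA k i0 D2 j0) i0 j0 ≤ pvGet D i0 k + pvGet D k j0 := by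
    rw [hX, pvGet_set' hshp2 hi0 hj0 _ i0 j0, if_pos ⟨rfl, rfl⟩]
    exact le_trans (min_le_right _ _) (add_le_add (hle2' i0 k) (hle2' k j0))
  obtain ⟨hshp3, hle3⟩ := pvFoldLe (pvRelaxA k i0) lb2
    (fun D' x hx hD' => ⟨pvRelax_shp hD' k i0 x, pvRelax_le hD' hi0 (hmemB2 x hx)⟩)
    (pvRelaxA k i0 D2 j0) hXshp
  obtain ⟨_, hle4⟩ := pvFoldLe (pvRowA N k) lb
    (fun D' x hx hD' => pvRowA_le (hmemB x hx) hD') (pvRowA N k D1 i0) (by rw [hrow]; exact hshp3)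
  refine le_trans (hle4 i0 j0) ?_
  rw [hrow]
  exact le_trans (hle3 i0 j0) hXval

-- a nonempty chain starts with an edge out of its start
theorem pvChain_head (g : Nat → Nat → Int) (x y : Nat) (l : List Nat)
    (hc : pvChain g x (l ++ [y])) : ∃ z, g x z < pvInf := by
  cases l with
  | nil => exact ⟨y, hc.1⟩
  | cons h t => exact ⟨h, hc.1⟩

-- characterisation of A's in-place Floyd–Warshall over the initial matrix M
theorem pvFWA_char (N : Nat) (M : List (List Int)) (hM : pvBnd N M) :
    pvBnd N (pvFWA N M) ∧ pvLB (fun u v => pvGet M u v) (pvFWA N M) ∧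
      pvUB (fun u v => pvGet M u v) N (pvFWA N M) := by
  set g := fun u v => pvGet M u v with hgdef
  have hg0 : ∀ u v, 0 ≤ g u v := fun u v => (hM.2 u v).1
  have hdom : ∀ u v, g u v < pvInf → u < N ∧ v < N := by
    intro u v h
    by_contra hc
    rw [show g u v = pvGet M u v from rfl, pvGet_big hM.1 u v hc] at h
    exact absurd h (lt_irrefl _)
  have hLB0 : pvLB g M := by
    intro a b
    by_cases h : pvGet M a b = pvInf
    · exact Or.inl h
    · refine Or.inr ⟨[], ⟨lt_of_le_of_ne (hM.2 a b).2 h, trivial⟩, ?_⟩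
      show pvGet M a b = g a b + 0
      rw [add_zero]
  have main : ∀ c : Nat,
      pvBnd N ((List.range c).foldl (pvStepA N) M) ∧
      pvLB g ((List.range c).foldl (pvStepA N) M) ∧
      pvUB g c ((List.range c).foldl (pvStepA N) M) := by
    intro c
    induction c with
    | zero =>
      refine ⟨hM, hLB0, ?_⟩
      intro a b l hc hnd hlt
      have hl : l = [] := by
        cases l with
        | nil => rfl
        | cons v t => exact absurd (hlt v (by simp)) (by omega)
      subst hl
      show pvGet M a b ≤ g a b + 0
      rw [add_zero]
    | succ c ih =>
      obtain ⟨ihB, ihL, ihU⟩ := ih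
      rw [List.range_succ, List.foldl_append, List.foldl_cons, List.foldl_nil]
      set Sc := (List.range c).foldl (pvStepA N) M with hSc
      have hstep := pvStepA_pres g (D := Sc) c ⟨ihB, ihL⟩
      refine ⟨hstep.1, hstep.2, ?_⟩
      intro a b l hc hnd hlt
      by_cases hcl : c ∈ l
      · obtain ⟨p, q, rfl⟩ := List.append_of_mem hcl
        have hL : (p ++ c :: q) ++ [b] = (p ++ [c]) ++ (q ++ [b]) := by simp
        rw [hL] at hc
        have hc' := (pvChain_append g (p ++ [c]) (q ++ [b]) a).mp hc
        rw [pvEnd_concat] at hc'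
        have hcost := pvCost_append g (p ++ [c]) (q ++ [b]) a
        rw [pvEnd_concat] at hcost
        -- nodup pieces
        have hnd1 : (a :: p ++ [c]).Nodup := by
          refine List.Sublist.nodup ?_ hnd
          refine List.Sublist.cons₂ a ?_
          have hsub : (p ++ [c]).Sublist (p ++ c :: q) :=
            List.Sublist.append_left (List.Sublist.cons₂ c (List.nil_sublist q)) p
          exact List.Sublist.trans hsub (List.sublist_append_left _ _)
        have hnd2 : (c :: q ++ [b]).Nodup := by
          refine List.Sublist.nodup ?_ hnd
          refine List.Sublist.trans ?_ (List.sublist_cons_self a _)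
          show ((c :: q) ++ [b]).Sublist ((p ++ c :: q) ++ [b])
          exact List.Sublist.append_right (List.sublist_append_right p (c :: q)) [b]
        have hcp : c ∉ p := by
          have h' : (p ++ [c]).Nodup := (List.nodup_cons.mp hnd1).2
          rw [List.nodup_append] at h'
          intro hmem
          exact h'.2.2 c hmem c (List.mem_singleton.mpr rfl) rfl
        have hcq : c ∉ q := by
          have h' := (List.nodup_cons.mp hnd2).1
          intro hmem
          exact h' (List.mem_append_left _ hmem)
        have hlt1 : ∀ v ∈ p, v < c := by
          intro v hv
          have h1 := hlt v (List.mem_append_left _ (by exact hv))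
          have h2 : v ≠ c := fun he => hcp (he ▸ hv)
          omega
        have hlt2 : ∀ v ∈ q, v < c := by
          intro v hv
          have h1 := hlt v (by
            refine List.mem_append_right _ ?_
            exact List.mem_cons_of_mem _ hv)
          have h2 : v ≠ c := fun he => hcq (he ▸ hv)
          omega
        have hb1 : pvGet Sc a c ≤ pvCost g a (p ++ [c]) := ihU a c p hc'.1 hnd1 hlt1
        have hb2 : pvGet Sc c b ≤ pvCost g c (q ++ [b]) := ihU c b q hc'.2 hnd2 hlt2
        by_cases hfin : pvCost g a ((p ++ c :: q) ++ [b]) < pvInf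
        · have h01 : 0 ≤ pvCost g a (p ++ [c]) := pvCost_nonneg g hg0 _ _
          have h02 : 0 ≤ pvCost g c (q ++ [b]) := pvCost_nonneg g hg0 _ _
          have hfin' : pvCost g a ((p ++ [c]) ++ (q ++ [b])) < pvInf := by
            rw [← hL]
            exact hfin
          rw [pvCost_append g (p ++ [c]) (q ++ [b]) a, pvEnd_concat] at hfin'
          have hg1 : pvGet Sc a c < pvInf := by omega
          have hg2 : pvGet Sc c b < pvInf := by omega
          have haN : a < N := by
            obtain ⟨z, hz⟩ := pvChain_head g a c p hc'.1
            exact (hdom a z hz).1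
          have hbN : b < N := by
            have : b ∈ (q ++ [b]) := List.mem_append_right _ (List.mem_singleton.mpr rfl)
            obtain ⟨u, hu⟩ := pvChain_mem g (q ++ [b]) c hc'.2 b this
            exact (hdom u b hu).2
          have hvisit := pvStep_visit ihB.1 haN hbN hg1 hg2
          rw [hL, hcost]
          omega
        · have hle := (hstep.1.2 a b).2
          omega
      · have hlt' : ∀ v ∈ l, v < c := by
          intro v hv
          have h1 := hlt v hv
          have h2 : v ≠ c := fun he => hcl (he ▸ hv)
          omega
        exact le_trans ((pvStepA_le ihB.1).2 a b) (ihU a b l hc hnd hlt')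
  exact ⟨(main N).1, (main N).2.1, (main N).2.2⟩

-- ---- B-side invariants ----

theorem pvLook_map (h : Nat → Int) :
    ∀ (kept : List Nat), kept.Nodup → ∀ v ∈ kept,
      pvLook (kept.map (fun v => (v, h v))) v = h v := by
  intro kept
  induction kept with
  | nil => intro _ v hv; cases hv
  | cons a t ih =>
    intro hnd v hv
    rcases List.mem_cons.mp hv with rfl | hv
    · simp [pvLook]
    · have hne : a ≠ v := fun he => (List.nodup_cons.mp hnd).1 (he ▸ hv)
      simp only [pvLook, List.map_cons, List.find?_cons,
        show ((a, h a).1 == v) = false by simpa using hne]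
      exact ih (List.nodup_cons.mp hnd).2 v hv

def pvBInv (g : Nat → Nat → Int) (kept : List Nat) (s : Nat) (r : Nat)
    (d : List (Nat × Int)) : Prop :=
  ∀ v ∈ kept,
    (0 ≤ pvLook d v ∧ pvLook d v ≤ pvInf) ∧
    (v = s → pvLook d v ≤ 0) ∧
    (pvLook d v = pvInf ∨ (pvLook d v = 0 ∧ v = s) ∨
      ∃ l, pvChain g s (l ++ [v]) ∧ pvLook d v = pvCost g s (l ++ [v])) ∧
    (∀ l, pvChain g s (l ++ [v]) → l.length + 1 ≤ r → pvLook d v ≤ pvCost g s (l ++ [v]))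

theorem pvRem_nodup (N mask : Nat) : (pvRem N mask).Nodup :=
  List.Nodup.filter _ List.nodup_range

theorem pvRem_mem (N mask v : Nat) : v ∈ pvRem N mask ↔ v < N ∧ pvKp mask v = true := by
  unfold pvRem
  rw [List.mem_filter, List.mem_range]

-- facts about the blanked matrix
theorem pvM_facts (N mask : Nat) (base : List (List Int)) (hb : pvBnd N base) :
    pvBnd N (pvBlank N mask base).1 ∧
    (∀ u v, pvGet (pvBlank N mask base).1 u v < pvInf →
      u ∈ pvRem N mask ∧ v ∈ pvRem N mask) ∧
    (∀ u v, u ∈ pvRem N mask → v ∈ pvRem N mask →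
      pvGet base u v = pvGet (pvBlank N mask base).1 u v) := by
  obtain ⟨hS, _, hG⟩ := pvBlank_spec N mask base hb.1
  have hinf0 : (0 : Int) ≤ pvInf := by norm_num [pvInf]
  have hent : ∀ a b, 0 ≤ pvGet (pvBlank N mask base).1 a b ∧
      pvGet (pvBlank N mask base).1 a b ≤ pvInf := by
    intro a b
    by_cases hab : a < N ∧ b < N
    · rw [hG a b hab.1 hab.2]
      split_ifs with h
      · exact hb.2 a b
      · exact ⟨hinf0, le_refl _⟩
    · rw [pvGet_big hS a b hab]
      exact ⟨hinf0, le_refl _⟩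
  refine ⟨⟨hS, hent⟩, ?_, ?_⟩
  · intro u v h
    by_cases huv : u < N ∧ v < N
    · rw [hG u v huv.1 huv.2] at h
      by_cases hk : pvKp mask u = true ∧ pvKp mask v = true
      · exact ⟨(pvRem_mem N mask u).mpr ⟨huv.1, hk.1⟩, (pvRem_mem N mask v).mpr ⟨huv.2, hk.2⟩⟩
      · rw [if_neg hk] at h
        exact absurd h (lt_irrefl _)
    · rw [pvGet_big hS u v huv] at h
      exact absurd h (lt_irrefl _)
  · intro u v hu hv
    obtain ⟨huN, hku⟩ := (pvRem_mem N mask u).mp hu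
    obtain ⟨hvN, hkv⟩ := (pvRem_mem N mask v).mp hv
    rw [hG u v huN hvN, if_pos ⟨hku, hkv⟩]

theorem pvFoldMin_ge (c : Int) : ∀ (l : List Int) (i : Int), c ≤ i → (∀ x ∈ l, c ≤ x) →
    c ≤ l.foldl min i := by
  intro l i hi hl
  rcases pvFoldMin_cases l i with h | h
  · rw [h]; exact hi
  · exact hl _ h

theorem pvBF_inv (N mask : Nat) (base : List (List Int)) (hb : pvBnd N base) (s : Nat)
    (hs : s ∈ pvRem N mask) :
    pvBInv (fun u v => pvGet (pvBlank N mask base).1 u v) (pvRem N mask) s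
      (pvRem N mask).length (pvBF base (pvRem N mask) s) := by
  obtain ⟨hMB, hgkept, hbase_eq⟩ := pvM_facts N mask base hb
  set g := fun u v => pvGet (pvBlank N mask base).1 u v with hgdef
  set kept := pvRem N mask with hkdef
  have hnd : kept.Nodup := pvRem_nodup N mask
  have hbe : ∀ u v, u ∈ kept → v ∈ kept → pvGet base u v = g u v :=
    fun u v hu hv => hbase_eq u v hu hv
  have hgk : ∀ u v, g u v < pvInf → u ∈ kept ∧ v ∈ kept :=
    fun u v h => hgkept u v h
  have hg0 : ∀ u v, 0 ≤ g u v := fun u v => (hMB.2 u v).1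
  have hgI : ∀ u v, g u v ≤ pvInf := fun u v => (hMB.2 u v).2
  have hinf0 : (0 : Int) ≤ pvInf := by norm_num [pvInf]
  -- membership in the candidate list
  have hcand_mem : ∀ (d : List (Nat × Int)) v x, x ∈ pvCands base kept d v →
      ∃ u, u ∈ kept ∧ pvLook d u < pvInf ∧ pvGet base u v < pvInf ∧
        x = pvLook d u + pvGet base u v := by
    intro d v x hx
    simp only [pvCands, List.mem_filterMap] at hx
    obtain ⟨u, hu, hval⟩ := hx
    split_ifs at hval with hcnd
    exact ⟨u, hu, hcnd.1, hcnd.2, (Option.some_inj.mp hval).symm⟩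
  have hcand_in : ∀ (d : List (Nat × Int)) v u, u ∈ kept → pvLook d u < pvInf →
      pvGet base u v < pvInf → (pvLook d u + pvGet base u v) ∈ pvCands base kept d v := by
    intro d v u hu h1 h2
    simp only [pvCands, List.mem_filterMap]
    exact ⟨u, hu, by rw [if_pos ⟨h1, h2⟩]⟩
  -- one relaxation round preserves the invariant, bumping the edge budget
  have hstep : ∀ r d, pvBInv g kept s r d → pvBInv g kept s (r + 1) (pvRound base kept d) := by
    intro r d hInv v hv
    have hlook : pvLook (pvRound base kept d) v =
        (pvCands base kept d v).foldl min (pvLook d v) :=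
      pvLook_map (fun v => (pvCands base kept d v).foldl min (pvLook d v)) kept hnd v hv
    obtain ⟨⟨hge0, hleI⟩, hseq, hLBv, hUBv⟩ := hInv v hv
    have hcand_nonneg : ∀ x ∈ pvCands base kept d v, 0 ≤ x := by
      intro x hx
      obtain ⟨u, hu, _, _, rfl⟩ := hcand_mem d v x hx
      exact add_nonneg ((hInv u hu).1.1) ((hb.2 u v).1)
    refine ⟨⟨?_, ?_⟩, ?_, ?_, ?_⟩
    · rw [hlook]
      exact pvFoldMin_ge 0 _ _ hge0 hcand_nonneg
    · rw [hlook]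
      exact le_trans (pvFoldMin_le_init _ _) hleI
    · intro hveq
      rw [hlook]
      exact le_trans (pvFoldMin_le_init _ _) (hseq hveq)
    · -- lower bound: the new value is inf, 0 at the source, or the cost of a walk
      rw [hlook]
      rcases pvFoldMin_cases (pvCands base kept d v) (pvLook d v) with h | h
      · rw [h]
        exact hLBv
      · obtain ⟨u, hu, h1, h2, heq⟩ := hcand_mem d v _ h
        rcases (hInv u hu).2.2.1 with h3 | ⟨h3, rfl⟩ | ⟨l1, hc1, he1⟩
        · rw [h3] at h1
          exact absurd h1 (lt_irrefl _)
        · -- one-edge walk from the source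
          refine Or.inr (Or.inr ⟨[], ?_, ?_⟩)
          · refine ⟨?_, trivial⟩
            rw [← hbe u v hu hv]
            exact h2
          · show _ = g u v + 0
            rw [heq, h3, hbe u v hu hv, zero_add, add_zero]
        · -- extend the walk to u by the edge (u, v)
          have hguv : g u v < pvInf := by
            rw [← hbe u v hu hv]
            exact h2
          refine Or.inr (Or.inr ⟨l1 ++ [u], ?_, ?_⟩)
          · exact (pvChain_append g (l1 ++ [u]) [v] s).mpr
              ⟨hc1, by rw [pvEnd_concat]; exact ⟨hguv, trivial⟩⟩
          · have hcost := pvCost_append g (l1 ++ [u]) [v] s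
            rw [pvEnd_concat] at hcost
            rw [hcost, heq, he1, hbe u v hu hv]
            show _ = _ + (g u v + 0)
            rw [add_zero]
    · -- upper bound against walks of at most r+1 edges
      intro l hcl hlen
      rw [hlook]
      rcases List.eq_nil_or_concat l with rfl | ⟨l0, u, rfl⟩
      · -- the single edge s → v
        have hgsv : g s v < pvInf := hcl.1
        have hls : pvLook d s < pvInf :=
          lt_of_le_of_lt ((hInv s hs).2.1 rfl) (by norm_num [pvInf])
        have hcnd := hcand_in d v s hs hls (by rw [hbe s v hs hv]; exact hgsv)
        refine le_trans (pvFoldMin_le_mem _ _ _ hcnd) ?_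
        show pvLook d s + pvGet base s v ≤ g s v + 0
        rw [hbe s v hs hv, add_zero]
        have := (hInv s hs).2.1 rfl
        omega
      · -- the walk ends with the edge (u, v)
        rw [List.concat_eq_append] at hcl hlen ⊢
        have hc' := (pvChain_append g (l0 ++ [u]) [v] s).mp (by
          rw [show (l0 ++ [u]) ++ [v] = l0 ++ [u] ++ [v] by simp]
          exact hcl)
        rw [pvEnd_concat] at hc'
        have hguv : g u v < pvInf := hc'.2.1
        have hu : u ∈ kept := (hgkept u v hguv).1
        have hlen0 : l0.length + 1 ≤ r := by
          simp only [List.length_append, List.length_singleton] at hlen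
          omega
        have hbu : pvLook d u ≤ pvCost g s (l0 ++ [u]) :=
          (hInv u hu).2.2.2 l0 hc'.1 hlen0
        have hcost := pvCost_append g (l0 ++ [u]) [v] s
        rw [pvEnd_concat] at hcost
        have hcv : pvCost g u [v] = g u v + 0 := rfl
        rw [hcv] at hcost
        by_cases hfin : pvCost g s ((l0 ++ [u]) ++ [v]) < pvInf
        · have h01 : 0 ≤ pvCost g s (l0 ++ [u]) := pvCost_nonneg g hg0 _ _
          have h02 : 0 ≤ g u v := hg0 u v
          have hluf : pvLook d u < pvInf := by
            rw [hcost] at hfin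
            omega
          have hcnd := hcand_in d v u hu hluf (by rw [hbe u v hu hv]; exact hguv)
          refine le_trans (pvFoldMin_le_mem _ _ _ hcnd) ?_
          rw [hcost, hbe u v hu hv]
          omega
        · refine le_trans (pvFoldMin_le_init _ _) (le_trans hleI ?_)
          omega
  -- the initial dict satisfies the invariant with budget 0
  have hbase0 : pvBInv g kept s 0 (pvDist0 kept s) := by
    intro v hv
    have hlook : pvLook (pvDist0 kept s) v = if v = s then 0 else pvInf :=
      pvLook_map (fun v => if v = s then 0 else pvInf) kept hnd v hv
    refine ⟨⟨?_, ?_⟩, ?_, ?_, ?_⟩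
    · rw [hlook]; split_ifs
      · exact le_refl 0
      · exact hinf0
    · rw [hlook]; split_ifs
      · exact hinf0
      · exact le_refl _
    · intro hveq
      rw [hlook, if_pos hveq]
    · rw [hlook]
      split_ifs with h
      · exact Or.inr (Or.inl ⟨rfl, h⟩)
      · exact Or.inl rfl
    · intro l _ hlen
      omega
  -- folding the rounds
  have hfold : ∀ (t : List Nat) (d : List (Nat × Int)) (r : Nat), pvBInv g kept s r d →
      pvBInv g kept s (r + t.length) (t.foldl (fun d _ => pvRound base kept d) d) := by
    intro t
    induction t with
    | nil => intro d r h; simpa using h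
    | cons a t' ih =>
      intro d r h
      simp only [List.foldl_cons, List.length_cons]
      have := ih (pvRound base kept d) (r + 1) (hstep r d h)
      rw [show r + (t'.length + 1) = r + 1 + t'.length by omega]
      exact this
  have := hfold kept (pvDist0 kept s) 0 hbase0
  simpa using this

-- ---- entry equality and the check ----

theorem pvEntry_eq (N mask : Nat) (base : List (List Int)) (hb : pvBnd N base)
    {x y : Nat} (hx : x ∈ pvRem N mask) (hy : y ∈ pvRem N mask) (hxy : x ≠ y) :
    pvGet (pvFWA N (pvBlank N mask base).1) x y = pvLook (pvBF base (pvRem N mask) x) y := by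
  obtain ⟨hMB, hgkept, hbase_eq⟩ := pvM_facts N mask base hb
  obtain ⟨hAB, hAL, hAU⟩ := pvFWA_char N (pvBlank N mask base).1 hMB
  have hBf := pvBF_inv N mask base hb x hx
  obtain ⟨⟨hB0, hBI⟩, _, hBLB, hBUB⟩ := hBf y hy
  have hg0 : ∀ u v, 0 ≤ pvGet (pvBlank N mask base).1 u v := fun u v => (hMB.2 u v).1
  have hdom : ∀ u v, pvGet (pvBlank N mask base).1 u v < pvInf → u < N ∧ v < N := by
    intro u v h
    by_contra hc
    rw [pvGet_big hMB.1 u v hc] at h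
    exact absurd h (lt_irrefl _)
  apply le_antisymm
  · -- A's entry ≤ B's value
    rcases hBLB with h | ⟨_, hys⟩ | ⟨l, hcl, heq⟩
    · rw [h]
      exact (hAB.2 x y).2
    · exact absurd hys.symm hxy
    · rw [heq]
      obtain ⟨l', hcl', hnd', hle'⟩ :=
        pvCut _ hg0 l.length l x y le_rfl hxy hcl
      refine le_trans (hAU x y l' hcl' hnd' ?_) hle'
      intro v hv
      obtain ⟨u, hu⟩ := pvChain_mem _ _ _ hcl' v (List.mem_append_left _ hv)
      exact (hdom u v hu).2
  · -- B's value ≤ A's entry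
    rcases hAL x y with h | ⟨l, hcl, heq⟩
    · rw [h]
      exact hBI
    · rw [heq]
      obtain ⟨l', hcl', hnd', hle'⟩ :=
        pvCut _ hg0 l.length l x y le_rfl hxy hcl
      refine le_trans (hBUB l' hcl' ?_) hle'
      have hsub : (x :: l' ++ [y]) ⊆ pvRem N mask := by
        intro v hv
        rcases List.mem_cons.mp hv with rfl | hv'
        · exact hx
        · obtain ⟨u, hu⟩ := pvChain_mem _ _ _ hcl' v hv'
          exact (hgkept u v hu).2
      have hlen := (List.Nodup.subperm hnd' hsub).length_le
      simp only [List.length_cons, List.length_append] at hlen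
      omega

theorem pvAllExt {α : Type} (p q : α → Bool) :
    ∀ l : List α, (∀ x ∈ l, p x = q x) → l.all p = l.all q := by
  intro l
  induction l with
  | nil => intro _; rfl
  | cons x t ih =>
    intro h
    simp only [List.all_cons]
    rw [h x (by simp), ih (fun y hy => h y (List.mem_cons_of_mem _ hy))]

theorem pvMask_eq (N : Nat) (md : Int) (base : List (List Int)) (hb : pvBnd N base)
    (ans : Int) (mask : Nat) : pvMaskA N md base ans mask = pvMaskB N md base ans mask := by
  unfold pvMaskA pvMaskB
  have hrem : (pvBlank N mask base).2 = pvRem N mask := (pvBlank_spec N mask base hb.1).2.1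
  have hkept : pvKept N mask = pvRem N mask := rfl
  rw [hrem, hkept]
  have hcheck : pvCheckA md (pvFWA N (pvBlank N mask base).1) (pvRem N mask) =
      (pvRem N mask).all (fun s => !pvSrcBad md base (pvRem N mask) s) := by
    unfold pvCheckA pvSrcBad
    apply pvAllExt
    intro x hxmem
    rw [Bool.eq_iff_iff, List.all_eq_true, Bool.not_eq_true', List.any_eq_false]
    constructor
    · intro h v hv
      have := h v hv
      by_cases hvx : v = x
      · simp [hvx]
      · rw [Bool.or_eq_true, beq_iff_eq] at this
        rcases this with h' | h'
        · exact absurd h'.symm hvx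
        · rw [Bool.not_eq_true, Bool.and_eq_false_iff]
          right
          rw [← pvEntry_eq N mask base hb hxmem hv (fun he => hvx he.symm)]
          simpa using h'
    · intro h v hv
      have := h v hv
      by_cases hvx : x = v
      · simp [hvx]
      · rw [Bool.not_eq_true, Bool.and_eq_false_iff] at this
        rcases this with h' | h'
        · simp only [Bool.not_eq_false', beq_iff_eq] at h'
          exact absurd h'.symm hvx
        · rw [Bool.or_eq_true]
          right
          rw [← pvEntry_eq N mask base hb hxmem hv hvx] at h'
          simpa using h'
  rw [hcheck]

theorem pvSet_bnd {N : Nat} {D : List (List Int)} (hD : pvBnd N D) {i j : Nat}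
    (hi : i < N) (hj : j < N) {v : Int} (h0 : 0 ≤ v) (h1 : v ≤ pvInf) :
    pvBnd N (pvSet D i j v) := by
  refine ⟨pvShp_set hD.1 i j v, ?_⟩
  intro a b
  rw [pvGet_set' hD.1 hi hj v a b]
  split_ifs with h
  · exact ⟨h0, h1⟩
  · exact hD.2 a b

theorem pvEdges_bnd (N : Nat) (roads : List (List Int))
    (hroads : ∀ r ∈ roads, ∃ a b c : Int, r = [a, b, c] ∧
      pvIdx N a < N ∧ pvIdx N b < N ∧ 0 ≤ c) :
    pvBnd N (pvEdges N roads) := by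
  unfold pvEdges
  refine pvFoldlInv (pvBnd N) (pvEdgeStep N) roads ?_ _ ?_
  · intro D r hr hD
    obtain ⟨a, b, c, rfl, ha, hbb, hc⟩ := hroads r hr
    show pvBnd N (pvEdgeStep N D [a, b, c])
    unfold pvEdgeStep
    have h1 : pvBnd N (pvSet D (pvIdx N a) (pvIdx N b)
        (min (pvGet D (pvIdx N a) (pvIdx N b)) c)) := by
      refine pvSet_bnd hD ha hbb (le_min (hD.2 _ _).1 hc)
        (le_trans (min_le_left _ _) (hD.2 _ _).2)
    exact pvSet_bnd h1 hbb ha (le_min (h1.2 _ _).1 hc)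
      (le_trans (min_le_left _ _) (h1.2 _ _).2)
  · constructor
    · refine ⟨by simp, ?_⟩
      intro row hrow
      rw [List.eq_of_mem_replicate hrow]
      simp
    · intro a b
      have hrow : ∀ i, (List.replicate N (List.replicate N pvInf)).getD i [] = [] ∨
          (List.replicate N (List.replicate N pvInf)).getD i [] = List.replicate N pvInf := by
        intro i
        by_cases hi : i < N
        · right
          rw [pvGetD_eq_getElem _ [] (by simpa using hi)]
          exact List.eq_of_mem_replicate (List.getElem_mem _)
        · left
          rw [List.getD_eq_getElem?_getD, List.getElem?_eq_none (by simpa using hi)]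
          rfl
      have hval : pvGet (List.replicate N (List.replicate N pvInf)) a b = pvInf := by
        unfold pvGet
        rcases hrow a with h | h <;> rw [h]
        · rfl
        · by_cases hb : b < N
          · rw [pvGetD_eq_getElem _ pvInf (by simpa using hb)]
            exact List.eq_of_mem_replicate (List.getElem_mem _)
          · rw [List.getD_eq_getElem?_getD, List.getElem?_eq_none (by simpa using hb)]
            rfl
      rw [hval]
      norm_num [pvInf]

theorem pv_main (n : Int) (maxDistance : Int) (roads : List (List Int))
    (hpre : Pre_numberOfSets n maxDistance roads) :
    numberOfSets n maxDistance roads = numberOfSets_alt n maxDistance roads := by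
  unfold numberOfSets numberOfSets_alt
  apply pvFoldlExt
  intro ans mask _
  refine pvMask_eq n.toNat maxDistance (pvEdges n.toNat roads) ?_ ans mask
  refine pvEdges_bnd n.toNat roads ?_
  intro r hr
  obtain ⟨hlen, h0a, h0b, h1a, h1b, h2⟩ := hpre.2 r hr
  have hn0 := hpre.1
  rcases r with _ | ⟨a, r1⟩
  · simp at hlen
  rcases r1 with _ | ⟨b, r2⟩
  · simp at hlen
  rcases r2 with _ | ⟨c, r3⟩
  · simp at hlen
  rcases r3 with _ | ⟨d, t⟩
  · refine ⟨a, b, c, rfl, ?_, ?_, ?_⟩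
    · simp only [List.getD_cons_zero] at h0a h0b
      unfold pvIdx
      split_ifs <;> omega
    · simp only [List.getD_cons_succ, List.getD_cons_zero] at h1a h1b
      unfold pvIdx
      split_ifs <;> omega
    · simpa using h2
  · simp only [List.length_cons] at hlen
    omega

-- ===== VERDICT (by name: the statement is the Claim_ definition above) =====
theorem numberOfSets_spec : Claim_equal_numberOfSets := by
  intro n maxDistance roads _ hpre
  exact pv_main n maxDistance roads hpre
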